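-- pv_equiv track=rewrite | github.com/pypi-data/pypi-mirror-343 | packages/AmericoDraws/americodraws-0.1.5.tar.gz/americodraws-0.1.5/AmericoDraws/utils.py | merge_paths
-- ===== SOURCE A (Python) =====
-- def merge_paths(paths_list):
--     """
--     Merge multiple paths into a single path with pen-up movements between them.
--
--     Args:
--         paths_list (list): List of path lists to merge
--
--     Returns:
--         list: Merged path
--     """
--     if not paths_list:
--         return []
--
--     merged_path = []
--     for path in paths_list:
--         if not path:
--             continue
--
--         if merged_path:
--             # Get last point from current merged path
--             last_point = merged_path[-1]
--             # Get first point from new path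
--             first_point = path[0]
--
--             # Add pen-up movement
--             z_up = 10  # Pen-up distance, might need to be configurable
--             pen_up_point = last_point.copy()
--             pen_up_point[2] += z_up
--             merged_path.append(pen_up_point)
--
--             # Move to new path start (pen up)
--             travel_point = first_point.copy()
--             travel_point[2] += z_up
--             merged_path.append(travel_point)
--
--             # Lower pen at new position
--             merged_path.append(first_point.copy())
--
--             # Add the rest of the new path
--             merged_path.extend(path[1:])
--         else:
--             merged_path.extend(path)
--
--     return merged_path
-- ===== SOURCE B (Python) =====
-- def merge_paths(paths_list):
--     """Merge paths by divide and conquer: recursively merge each half of the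
--     non-empty paths, then join the two merged halves with a pen-up bridge."""
--     nonempty = [p for p in paths_list if p]
--     if not nonempty:
--         return []
--     return _merge_dc(nonempty)
--
--
-- def _merge_dc(paths):
--     if len(paths) == 1:
--         return list(paths[0])
--     mid = len(paths) // 2
--     left = _merge_dc(paths[:mid])
--     right = _merge_dc(paths[mid:])
--     up = left[-1].copy()
--     up[2] += 10
--     down = right[0].copy()
--     down[2] += 10
--     return left + [up, down, right[0].copy()] + right[1:]
-- ===== Notes on version B (the rewrite author's own statement) =====
-- stated objective: alternative
-- what changed: B replaces A's single accumulator loop by a divide-and-conquer recursion: it filters to the non-empty paths once, recursively merges each half, and joins the two merged halves with one pen-up bridge, which is correct because the bridge depends only on the last point of the left result and the first of the right, so joining is associative.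
import Mathlib
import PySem

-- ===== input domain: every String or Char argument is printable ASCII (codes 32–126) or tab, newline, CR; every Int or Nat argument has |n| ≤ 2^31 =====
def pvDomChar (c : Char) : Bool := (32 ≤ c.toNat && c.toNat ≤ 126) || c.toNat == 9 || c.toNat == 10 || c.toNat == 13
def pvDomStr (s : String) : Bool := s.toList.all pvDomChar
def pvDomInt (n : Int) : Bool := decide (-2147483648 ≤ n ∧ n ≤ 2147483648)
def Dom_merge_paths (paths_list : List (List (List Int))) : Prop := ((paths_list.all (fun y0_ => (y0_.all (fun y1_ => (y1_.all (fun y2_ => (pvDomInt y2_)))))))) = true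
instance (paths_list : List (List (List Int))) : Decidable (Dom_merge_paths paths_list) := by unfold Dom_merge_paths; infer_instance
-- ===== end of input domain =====

-- B merges the non-empty paths by divide and conquer (recursively merge halves,
-- join with one pen-up bridge), instead of A's single accumulator loop (objective:
-- alternative). Equivalence is about the return value; neither program mutates its argument.


-- ===== PORT A =====
-- point.copy(); point[2] += 10  (Pre_ guarantees the point has index 2)
def pvBump (p : List Int) : List Int :=
  match p with
  | a :: b :: c :: r => a :: b :: (c + 10) :: r
  | l => l

def mergeStepA (merged : List (List Int)) (path : List (List Int)) : List (List Int) :=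
  if path.isEmpty then merged
  else if !merged.isEmpty then
    merged ++ [pvBump (merged.getLastD []), pvBump (path.headD []), path.headD []] ++ path.tail
  else merged ++ path

def merge_paths (paths_list : List (List (List Int))) : List (List Int) :=
  if paths_list.isEmpty then [] else paths_list.foldl mergeStepA []

-- ===== PORT B =====
-- left + [up, down, right[0].copy()] + right[1:]
def pvJoin (X Y : List (List Int)) : List (List Int) :=
  X ++ [pvBump (X.getLastD []), pvBump (Y.headD []), Y.headD []] ++ Y.tail

-- _merge_dc; the [] case is unreachable in B (it is only called on non-empty lists)
-- and is a totality guard here.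
def pvDC (paths : List (List (List Int))) : List (List Int) :=
  match paths with
  | [] => []
  | [p] => p
  | a :: b :: rest =>
    let l := a :: b :: rest
    pvJoin (pvDC (l.take (l.length / 2))) (pvDC (l.drop (l.length / 2)))
termination_by paths.length
decreasing_by
  · simp; omega
  · simp; omega

def merge_paths_alt (paths_list : List (List (List Int))) : List (List Int) :=
  match paths_list.filter (fun p => !p.isEmpty) with
  | [] => []
  | h :: t => pvDC (h :: t)

-- ===== PRECONDITION & SPEC =====
-- Pre_ excludes exactly the inputs where Python A raises IndexError: at each pen-up
-- transition (consecutive non-empty paths) the boundary points must have index 2.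
def Pre_merge_paths (paths_list : List (List (List Int))) : Prop :=
  ∀ pc ∈ List.zip (paths_list.filter (fun p => !p.isEmpty))
                  (paths_list.filter (fun p => !p.isEmpty)).tail,
    3 ≤ (pc.1.getLastD []).length ∧ 3 ≤ (pc.2.headD []).length
instance (paths_list : List (List (List Int))) : Decidable (Pre_merge_paths paths_list) := by
  unfold Pre_merge_paths; infer_instance

def pvWitness_merge_paths : List (List (List Int)) :=
  [[[0, 0, 0], [1, 0, 0]], [], [[5, 5, 0]]]

def Spec_merge_paths (paths_list : List (List (List Int))) (out : List (List Int)) : Prop := out = merge_paths_alt paths_list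
instance (paths_list : List (List (List Int))) (out : List (List Int)) : Decidable (Spec_merge_paths paths_list out) := by unfold Spec_merge_paths; infer_instance

-- ===== CLAIM (what is proved, stated in full; the proofs are below) =====
def Claim_equal_merge_paths : Prop := ∀ (paths_list : List (List (List Int))), Dom_merge_paths paths_list → Pre_merge_paths paths_list → Spec_merge_paths paths_list (merge_paths paths_list)

-- ===== LEMMAS AND PROOFS =====

-- pvJoin X Y with Y nonempty is (X ++ two bridge points) ++ Y
theorem pvJoin_eq_append (X Y : List (List Int)) (h : Y ≠ []) :
    pvJoin X Y = (X ++ [pvBump (X.getLastD []), pvBump (Y.headD [])]) ++ Y := by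
  cases Y with
  | nil => exact absurd rfl h
  | cons y ys => simp [pvJoin]

theorem pvJoin_ne_nil (X Y : List (List Int)) : pvJoin X Y ≠ [] := by
  simp [pvJoin]

theorem getLastD_append_of_ne {α : Type} (acc l : List α) (d : α) (h : l ≠ []) :
    (acc ++ l).getLastD d = l.getLastD d := by
  simp only [List.getLastD_eq_getLast?, List.getLast?_append]
  cases hx : l.getLast? with
  | none => exact absurd (List.getLast?_eq_none_iff.mp hx) h
  | some x => simp

theorem pvJoin_lastD (X Y : List (List Int)) (h : Y ≠ []) :
    (pvJoin X Y).getLastD [] = Y.getLastD [] := by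
  rw [pvJoin_eq_append X Y h, getLastD_append_of_ne _ _ _ h]

theorem pvJoin_headD (X Y : List (List Int)) (h : X ≠ []) :
    (pvJoin X Y).headD [] = X.headD [] := by
  cases X with
  | nil => exact absurd rfl h
  | cons x xs => simp [pvJoin]

theorem pvJoin_assoc (X Y Z : List (List Int)) (hY : Y ≠ []) (hZ : Z ≠ []) :
    pvJoin (pvJoin X Y) Z = pvJoin X (pvJoin Y Z) := by
  rw [pvJoin_eq_append _ Z hZ, pvJoin_lastD X Y hY,
      pvJoin_eq_append X Y hY,
      pvJoin_eq_append X (pvJoin Y Z) (pvJoin_ne_nil Y Z),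
      pvJoin_headD Y Z hY,
      pvJoin_eq_append Y Z hZ]
  simp

theorem foldl_join_ne_nil (t : List (List (List Int))) (a : List (List Int)) (ha : a ≠ []) :
    t.foldl pvJoin a ≠ [] := by
  induction t generalizing a with
  | nil => exact ha
  | cons y ys ih => exact ih _ (pvJoin_ne_nil a y)

theorem foldl_join_cons (ys : List (List (List Int))) (a y : List (List Int))
    (hy : y ≠ []) (hall : ∀ p ∈ ys, p ≠ []) :
    (y :: ys).foldl pvJoin a = pvJoin a (ys.foldl pvJoin y) := by
  induction ys generalizing a y with
  | nil => rfl
  | cons z zs ih =>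
    have hz : z ≠ [] := hall z (by simp)
    have hall' : ∀ p ∈ zs, p ≠ [] := fun p hp => hall p (by simp [hp])
    have hM : zs.foldl pvJoin z ≠ [] := foldl_join_ne_nil zs z hz
    calc (y :: z :: zs).foldl pvJoin a
        = (z :: zs).foldl pvJoin (pvJoin a y) := rfl
      _ = pvJoin (pvJoin a y) (zs.foldl pvJoin z) := ih _ _ hz hall'
      _ = pvJoin a (pvJoin y (zs.foldl pvJoin z)) := pvJoin_assoc _ _ _ hy hM
      _ = pvJoin a ((z :: zs).foldl pvJoin y) := by rw [← ih _ _ hz hall']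

-- D&C equals the left fold of pvJoin
theorem pvDC_eq_foldl (l : List (List (List Int))) (hl : l ≠ []) (hall : ∀ p ∈ l, p ≠ []) :
    pvDC l = l.tail.foldl pvJoin (l.headD []) := by
  induction hn : l.length using Nat.strong_induction_on generalizing l with
  | _ n ih =>
  match l with
  | [] => exact absurd rfl hl
  | [p] => simp [pvDC]
  | a :: b :: rest =>
    have hlen : (a :: b :: rest).length = rest.length + 2 := by simp
    set L := a :: b :: rest with hL
    have hk : L.length / 2 < L.length := by rw [hL]; simp; omega
    have hk1 : 1 ≤ L.length / 2 := by rw [hL]; simp; omega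
    have htake_len : (L.take (L.length / 2)).length = L.length / 2 := by
      rw [List.length_take]; omega
    have hdrop_len : (L.drop (L.length / 2)).length = L.length - L.length / 2 := by
      rw [List.length_drop]
    have htake_ne : L.take (L.length / 2) ≠ [] := by
      intro h; rw [← List.length_eq_zero_iff] at h; omega
    have hdrop_ne : L.drop (L.length / 2) ≠ [] := by
      intro h; rw [← List.length_eq_zero_iff] at h
      rw [hdrop_len] at h; omega
    have htake_all : ∀ p ∈ L.take (L.length / 2), p ≠ [] :=
      fun p hp => hall p (List.mem_of_mem_take hp)
    have hdrop_all : ∀ p ∈ L.drop (L.length / 2), p ≠ [] :=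
      fun p hp => hall p (List.mem_of_mem_drop hp)
    have hTake := ih (L.take (L.length / 2)).length (by omega) _ htake_ne htake_all rfl
    have hDrop := ih (L.drop (L.length / 2)).length (by rw [hdrop_len]; omega) _ hdrop_ne hdrop_all rfl
    have hDC : pvDC L = pvJoin (pvDC (L.take (L.length / 2))) (pvDC (L.drop (L.length / 2))) := by
      rw [hL, pvDC]
    rw [hDC, hTake, hDrop]
    -- decompose L = take ++ drop, take = x :: xt, drop = y :: yt
    obtain ⟨x, xt, hx⟩ : ∃ x xt, L.take (L.length / 2) = x :: xt := by
      cases h : L.take (L.length / 2) with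
      | nil => exact absurd h htake_ne
      | cons x xt => exact ⟨x, xt, rfl⟩
    obtain ⟨y, yt, hy⟩ : ∃ y yt, L.drop (L.length / 2) = y :: yt := by
      cases h : L.drop (L.length / 2) with
      | nil => exact absurd h hdrop_ne
      | cons y yt => exact ⟨y, yt, rfl⟩
    have hsplit : L = (x :: xt) ++ (y :: yt) := by
      rw [← hx, ← hy, List.take_append_drop]
    have hheadL : L.headD [] = x := by rw [hsplit]; simp
    have htailL : L.tail = xt ++ (y :: yt) := by rw [hsplit]; simp
    have hy_ne : y ≠ [] := hdrop_all y (by rw [hy]; simp)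
    have hyt_all : ∀ p ∈ yt, p ≠ [] := fun p hp => hdrop_all p (by rw [hy]; simp [hp])
    rw [hx, hy]
    simp only [List.headD_cons, List.tail_cons] at *
    rw [hheadL, htailL, List.foldl_append]
    exact (foldl_join_cons yt (xt.foldl pvJoin x) y hy_ne hyt_all).symm

-- A's fold on non-empty accumulator over non-empty paths is the pvJoin fold
theorem foldl_stepA_eq_join (t : List (List (List Int))) (acc : List (List Int))
    (hacc : acc ≠ []) (hall : ∀ p ∈ t, p ≠ []) :
    t.foldl mergeStepA acc = t.foldl pvJoin acc := by
  induction t generalizing acc with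
  | nil => rfl
  | cons p ps ih =>
    have hp : p ≠ [] := hall p (by simp)
    have hpE : p.isEmpty = false := by simpa using hp
    have haccE : acc.isEmpty = false := by simpa using hacc
    have hstep : mergeStepA acc p = pvJoin acc p := by
      simp [mergeStepA, pvJoin, hpE, haccE]
    rw [List.foldl_cons, List.foldl_cons, hstep]
    exact ih _ (pvJoin_ne_nil acc p) (fun q hq => hall q (by simp [hq]))

-- A's fold skips empty paths: it equals the fold over the filtered list
theorem foldl_stepA_filter (paths : List (List (List Int))) (m : List (List Int)) :
    paths.foldl mergeStepA m = (paths.filter (fun p => !p.isEmpty)).foldl mergeStepA m := by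
  induction paths generalizing m with
  | nil => rfl
  | cons p t ih =>
    by_cases hp : p = []
    · subst hp; simpa [mergeStepA] using ih m
    · have : p.isEmpty = false := by simpa using hp
      simp [this, ih]

-- ===== VERDICT (by name: the statement is the Claim_ definition above) =====
theorem merge_paths_spec : Claim_equal_merge_paths := by
  intro paths_list _ _
  unfold Spec_merge_paths merge_paths merge_paths_alt
  by_cases h0 : paths_list = []
  · subst h0; rfl
  · have h0E : paths_list.isEmpty = false := by simpa using h0
    simp only [h0E, Bool.false_eq_true, if_false]
    rw [foldl_stepA_filter]
    cases hf : paths_list.filter (fun p => !p.isEmpty) with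
    | nil => rfl
    | cons h t =>
      have hh : h ≠ [] := by
        have := List.of_mem_filter (a := h) (by rw [hf]; simp)
        simpa using this
      have hhE : h.isEmpty = false := by simpa using hh
      have hne : ∀ p ∈ t, p ≠ [] := by
        intro p hp
        have := List.of_mem_filter (a := p) (by rw [hf]; simp [hp])
        simpa using this
      rw [List.foldl_cons, show mergeStepA [] h = h by simp [mergeStepA, hhE],
          foldl_stepA_eq_join t h hh hne]
      show List.foldl pvJoin h t = pvDC (h :: t)
      rw [pvDC_eq_foldl (h :: t) (by simp) (by
            intro p hp
            rcases List.mem_cons.mp hp with rfl | hp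
            · exact hh
            · exact hne p hp)]
      simp
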